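-- pv_equiv track=rewrite | github.com/yuantailing/qrcode-annotate | scripts/wrap_images.py | regular_box
-- ===== SOURCE A (Python) =====
-- def regular_box(points, idname):
--     if len(points) == 2:
--         points = [points[0], [points[0][0], points[1][1]], points[1], [points[1][0], points[0][1]]]
--     elif len(points) == 3:
--         points = [points[0], points[1], points[2], [points[0][0] - points[1][0] + points[2][0], points[0][1] - points[1][1] + points[2][1]]]
--     elif len(points) == 4:
--         pass
--     else:
--         raise NotImplementedError
--     line1 = (points[1][0] - points[0][0], points[1][1] - points[0][1])
--     line2 = (points[2][0] - points[1][0], points[2][1] - points[1][1])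
--     if line1[0] * line2[1] - line1[1] * line2[0] < 0:
--         points = [points[0], points[3], points[2], points[1]]
--     while points[0][0] + points[0][1] > min(p[0] + p[1] for p in points):
--         points = [points[1], points[2], points[3], points[0]]
--     return points
-- ===== SOURCE B (Python) =====
-- def regular_box(points, idname):
--     if len(points) == 2:
--         p0, p1 = points
--         q = [p0, [p0[0], p1[1]], p1, [p1[0], p0[1]]]
--     elif len(points) == 3:
--         p0, p1, p2 = points
--         q = [p0, p1, p2, [p0[0] - p1[0] + p2[0], p0[1] - p1[1] + p2[1]]]
--     elif len(points) == 4: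
--         q = list(points)
--     else:
--         raise NotImplementedError
--     if (q[1][0] - q[0][0]) * (q[2][1] - q[1][1]) - (q[1][1] - q[0][1]) * (q[2][0] - q[1][0]) < 0:
--         q = q[:1] + q[1:][::-1]
--     rotations = [q[i:] + q[:i] for i in range(4)]
--     return min(rotations, key=lambda c: c[0][0] + c[0][1])
-- ===== Notes on version B (the rewrite author's own statement) =====
-- stated objective: alternative
-- what changed: B replaces A's mutate-and-retest while-loop (repeatedly cycling the list until the front corner has minimal x+y) by a generate-and-select pass: it materialises the four cyclic rotations with slicing and returns min(rotations, key=head x+y), tie-broken by Python min's first-wins rule; the orientation flip is done by slice reversal instead of index shuffling.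
import Mathlib
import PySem

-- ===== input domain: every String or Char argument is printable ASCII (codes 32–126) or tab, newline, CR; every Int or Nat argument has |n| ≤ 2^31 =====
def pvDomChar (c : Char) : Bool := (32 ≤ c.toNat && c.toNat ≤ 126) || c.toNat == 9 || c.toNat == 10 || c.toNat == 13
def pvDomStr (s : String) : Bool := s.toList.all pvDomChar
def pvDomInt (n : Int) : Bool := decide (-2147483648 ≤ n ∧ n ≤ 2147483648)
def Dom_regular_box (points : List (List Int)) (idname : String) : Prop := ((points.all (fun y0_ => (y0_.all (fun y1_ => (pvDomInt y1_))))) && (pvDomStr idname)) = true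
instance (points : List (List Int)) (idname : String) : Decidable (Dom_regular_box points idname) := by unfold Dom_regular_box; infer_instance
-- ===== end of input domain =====

-- ===== PORT A =====

-- B replaces A's mutate-and-retest while-loop by a generate-and-select pass: it materialises
-- the four cyclic rotations (slicing) and takes min by head x+y (first-wins on ties, like
-- Python's min); the orientation flip is a slice reversal. Alternative decomposition, same cost.

-- p[i] for 0 ≤ i < p.length (guaranteed by Pre_); exact there, Python raises IndexError otherwise
def pvAt (p : List Int) (i : Nat) : Int := p.getD i 0
-- p[0] + p[1], the corner sum both programs compare
def pvSum (p : List Int) : Int := pvAt p 0 + pvAt p 1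

-- ===== PORT A =====
-- the quadrilateral A builds from 2/3/4 input points (its reassignments of `points`)
def buildQuad (points : List (List Int)) : List (List Int) :=
  if points.length = 2 then
    [points.getD 0 [], [pvAt (points.getD 0 []) 0, pvAt (points.getD 1 []) 1],
     points.getD 1 [], [pvAt (points.getD 1 []) 0, pvAt (points.getD 0 []) 1]]
  else if points.length = 3 then
    [points.getD 0 [], points.getD 1 [], points.getD 2 [],
     [pvAt (points.getD 0 []) 0 - pvAt (points.getD 1 []) 0 + pvAt (points.getD 2 []) 0,
      pvAt (points.getD 0 []) 1 - pvAt (points.getD 1 []) 1 + pvAt (points.getD 2 []) 1]]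
  else points   -- length 4: pass; any other length raises NotImplementedError (excluded by Pre_)

-- A's while-loop, rotating one step while the front corner's sum exceeds the minimum sum.
-- fuel 4: the rotation has period 4 and the loop stops at the first minimal corner, so it
-- terminates within 3 iterations; the fuel only makes the recursion structural.
def rotLoop : Nat → List (List Int) → List (List Int)
  | 0, pts => pts
  | n + 1, pts =>
      if pvSum (pts.getD 0 []) > ((pts.map pvSum).min?.getD 0) then
        rotLoop n [pts.getD 1 [], pts.getD 2 [], pts.getD 3 [], pts.getD 0 []]
      else pts

def regular_box (points : List (List Int)) (idname : String) : List (List Int) :=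
  let pts := buildQuad points
  let line1 := (pvAt (pts.getD 1 []) 0 - pvAt (pts.getD 0 []) 0, pvAt (pts.getD 1 []) 1 - pvAt (pts.getD 0 []) 1)
  let line2 := (pvAt (pts.getD 2 []) 0 - pvAt (pts.getD 1 []) 0, pvAt (pts.getD 2 []) 1 - pvAt (pts.getD 1 []) 1)
  let pts2 := if line1.1 * line2.2 - line1.2 * line2.1 < 0 then
                [pts.getD 0 [], pts.getD 3 [], pts.getD 2 [], pts.getD 1 []]
              else pts
  rotLoop 4 pts2

-- ===== PORT B =====
def regular_box_alt (points : List (List Int)) (idname : String) : List (List Int) :=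
  let q :=
    if points.length = 2 then
      [points.getD 0 [], [pvAt (points.getD 0 []) 0, pvAt (points.getD 1 []) 1],
       points.getD 1 [], [pvAt (points.getD 1 []) 0, pvAt (points.getD 0 []) 1]]
    else if points.length = 3 then
      [points.getD 0 [], points.getD 1 [], points.getD 2 [],
       [pvAt (points.getD 0 []) 0 - pvAt (points.getD 1 []) 0 + pvAt (points.getD 2 []) 0,
        pvAt (points.getD 0 []) 1 - pvAt (points.getD 1 []) 1 + pvAt (points.getD 2 []) 1]]
    else points   -- length 4 (list(points) copies; same value); other lengths raise NotImplementedError (excluded by Pre_)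
  -- q[:1] + q[1:][::-1] : take 1 ++ reverse of drop 1 (exact: Python list slices/reversal)
  let q2 :=
    if (pvAt (q.getD 1 []) 0 - pvAt (q.getD 0 []) 0) * (pvAt (q.getD 2 []) 1 - pvAt (q.getD 1 []) 1)
       - (pvAt (q.getD 1 []) 1 - pvAt (q.getD 0 []) 1) * (pvAt (q.getD 2 []) 0 - pvAt (q.getD 1 []) 0) < 0 then
      q.take 1 ++ (q.drop 1).reverse
    else q
  -- [q2[i:] + q2[:i] for i in range(4)] : drop/take slices
  let rotations := (List.range 4).map (fun i => q2.drop i ++ q2.take i)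
  -- min(rotations, key=λ c. c[0][0]+c[0][1]) : PySem.List.min? keeps the FIRST extremal element
  (PySem.List.min? rotations (fun c => pvSum (c.getD 0 []))).getD []

-- ===== PRECONDITION & SPEC =====
-- A raises NotImplementedError unless len(points) ∈ {2,3,4}, and IndexError when a point it
-- indexes has fewer than 2 coordinates; Pre_ excludes exactly those inputs.
def Pre_regular_box (points : List (List Int)) (idname : String) : Prop :=
  (points.length = 2 ∨ points.length = 3 ∨ points.length = 4) ∧ ∀ p ∈ points, 2 ≤ p.length
instance (points : List (List Int)) (idname : String) : Decidable (Pre_regular_box points idname) := by unfold Pre_regular_box; infer_instance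
def pvWitness_regular_box : List (List Int) × String := ([[0, 0], [3, 2]], "q")

def Spec_regular_box (points : List (List Int)) (idname : String) (out : List (List Int)) : Prop := out = regular_box_alt points idname
instance (points : List (List Int)) (idname : String) (out : List (List Int)) : Decidable (Spec_regular_box points idname out) := by unfold Spec_regular_box; infer_instance

-- ===== CLAIM =====
def Claim_equal_regular_box : Prop := ∀ (points : List (List Int)) (idname : String), Dom_regular_box points idname → Pre_regular_box points idname → Spec_regular_box points idname (regular_box points idname)

-- ===== LEMMAS AND PROOFS =====

-- core: on any 4-list, A's rotate-while-loop equals B's min-over-rotations selection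
set_option maxHeartbeats 2000000 in
theorem rot_eq_min (a b c d : List Int) :
    rotLoop 4 [a, b, c, d]
      = (PySem.List.min? ((List.range 4).map (fun i => ([a, b, c, d].drop i) ++ ([a, b, c, d].take i)))
          (fun c => pvSum (c.getD 0 []))).getD [] := by
  simp only [List.range_succ, List.range_zero, List.map, List.nil_append, List.cons_append,
    List.drop, List.take, List.map_cons, rotLoop, PySem.List.min?, List.foldl,
    List.min?, List.getD, List.getElem?_cons_zero, List.getElem?_cons_succ, Option.getD_some,
    List.append_nil, gt_iff_lt]
  split_ifs <;>
    simp only [List.getElem?_cons_zero, Option.getD_some] <;>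
    split_ifs <;>
    simp only [List.getElem?_cons_zero, Option.getD_some] <;>
    split_ifs <;>
    simp only [List.getElem?_cons_zero, Option.getD_some] <;>
    first | rfl | omega

-- both tails on an explicit 4-list quad [a, b, c, d] (everything after the 2/3/4 build)
theorem tail_eq (a b c d : List Int) :
    rotLoop 4 (if (pvAt b 0 - pvAt a 0) * (pvAt c 1 - pvAt b 1) - (pvAt b 1 - pvAt a 1) * (pvAt c 0 - pvAt b 0) < 0
               then [a, d, c, b] else [a, b, c, d])
      = (PySem.List.min? ((List.range 4).map (fun i =>
            ((if (pvAt b 0 - pvAt a 0) * (pvAt c 1 - pvAt b 1) - (pvAt b 1 - pvAt a 1) * (pvAt c 0 - pvAt b 0) < 0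
               then [a, d, c, b] else [a, b, c, d]).drop i) ++
            ((if (pvAt b 0 - pvAt a 0) * (pvAt c 1 - pvAt b 1) - (pvAt b 1 - pvAt a 1) * (pvAt c 0 - pvAt b 0) < 0
               then [a, d, c, b] else [a, b, c, d]).take i)))
          (fun c => pvSum (c.getD 0 []))).getD [] := by
  split_ifs
  · exact rot_eq_min a d c b
  · exact rot_eq_min a b c d

theorem regular_box_eq (points : List (List Int)) (idname : String)
    (h : Pre_regular_box points idname) :
    regular_box points idname = regular_box_alt points idname := by
  obtain ⟨h, -⟩ := h
  rcases points with _ | ⟨p0, _ | ⟨p1, _ | ⟨p2, _ | ⟨p3, _ | rest⟩⟩⟩⟩ <;>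
    simp only [List.length_cons, List.length_nil] at h <;> try omega
  · exact tail_eq p0 [pvAt p0 0, pvAt p1 1] p1 [pvAt p1 0, pvAt p0 1]
  · exact tail_eq p0 p1 p2 [pvAt p0 0 - pvAt p1 0 + pvAt p2 0, pvAt p0 1 - pvAt p1 1 + pvAt p2 1]
  · exact tail_eq p0 p1 p2 p3

-- ===== VERDICT =====
theorem regular_box_spec : Claim_equal_regular_box := by
  intro points idname _ h
  exact regular_box_eq points idname h
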